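-- pv_equiv track=rewrite | github.com/saa938/quantum-hash | time.py | toy_hash_bits
-- ===== SOURCE A (Python) =====
-- A = [
--     [0, 0, 1, 0, 0, 0, 1, 0, 0, 0],
--     [1, 0, 0, 1, 0, 0, 0, 1, 0, 0],
--     [1, 1, 1, 0, 0, 1, 0, 0, 1, 0],
--     [0, 1, 0, 0, 1, 0, 1, 0, 0, 1],
--     [1, 0, 1, 0, 1, 1, 0, 1, 0, 0],
--     [1, 1, 1, 1, 1, 0, 1, 0, 1, 1],
--     [0, 1, 0, 1, 0, 0, 1, 1, 0, 0],
--     [1, 0, 1, 0, 1, 1, 0, 0, 1, 0],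
--     [1, 1, 0, 0, 0, 1, 1, 0, 0, 1],
--     [0, 0, 1, 1, 0, 0, 1, 1, 1, 0],
-- ]
--
-- def toy_hash_bits(x: int) -> str:
--     bits = []
--     for j in range(8):
--         s = 0
--         for i in range(8):
--             if A[j][i]:
--                 s ^= ((x >> i) & 1)
--         bits.append(str(s))
--     return ''.join(bits)
-- ===== SOURCE B (Python) =====
-- # Precomputed row bitmasks of the 8x8 GF(2) matrix (bit i of _MASKS[j] = A[j][i]):
-- # row j's output bit is the parity of x & _MASKS[j], computed by an xor-fold.
-- _MASKS = [68, 137, 39, 82, 181, 95, 202, 53]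
--
-- def toy_hash_bits(x: int) -> str:
--     out = []
--     for m in _MASKS:
--         v = x & m          # non-negative, fits in 8 bits
--         v ^= v >> 4
--         v ^= v >> 2
--         v ^= v >> 1
--         out.append(str(v & 1))
--     return ''.join(out)
-- ===== Notes on version B (the rewrite author's own statement) =====
-- stated objective: simpler
-- what changed: Replaces the per-bit scan of the matrix rows (inner loop with a conditional XOR per entry) by eight precomputed row bitmasks: each output bit is the parity of x & mask, computed with a three-step xor-fold, so the matrix and the inner conditional loop disappear.
import Mathlib
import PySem

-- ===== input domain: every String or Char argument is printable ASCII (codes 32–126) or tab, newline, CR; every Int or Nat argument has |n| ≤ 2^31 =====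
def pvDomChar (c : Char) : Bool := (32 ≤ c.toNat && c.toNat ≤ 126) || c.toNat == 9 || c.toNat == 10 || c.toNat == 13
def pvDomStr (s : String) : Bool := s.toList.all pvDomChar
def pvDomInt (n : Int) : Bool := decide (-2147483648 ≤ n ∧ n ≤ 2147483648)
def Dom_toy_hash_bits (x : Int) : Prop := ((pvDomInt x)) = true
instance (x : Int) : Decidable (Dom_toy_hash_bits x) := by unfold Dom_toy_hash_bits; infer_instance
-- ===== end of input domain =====

-- B replaces A's per-entry scan of the 8x8 matrix by precomputed row bitmasks and an
-- xor-fold parity of x & mask (objective: simpler — no matrix, no inner conditional loop).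

-- ===== PORT A =====
def pvMatrix : List (List Int) := [
  [0, 0, 1, 0, 0, 0, 1, 0, 0, 0],
  [1, 0, 0, 1, 0, 0, 0, 1, 0, 0],
  [1, 1, 1, 0, 0, 1, 0, 0, 1, 0],
  [0, 1, 0, 0, 1, 0, 1, 0, 0, 1],
  [1, 0, 1, 0, 1, 1, 0, 1, 0, 0],
  [1, 1, 1, 1, 1, 0, 1, 0, 1, 1],
  [0, 1, 0, 1, 0, 0, 1, 1, 0, 0],
  [1, 0, 1, 0, 1, 1, 0, 0, 1, 0],
  [1, 1, 0, 0, 0, 1, 1, 0, 0, 1],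
  [0, 0, 1, 1, 0, 0, 1, 1, 1, 0]]

-- bits = []; for j in range(8): s = 0; for i in range(8): if A[j][i]: s ^= (x >> i) & 1;
-- bits.append(str(s)); return ''.join(bits).  i, j ∈ [0, 8), so i.toNat is exact and the
-- pyGetD defaults are never reached.
def toy_hash_bits (x : Int) : String :=
  let bits : List String := (PySem.List.pyRange 0 8 1).foldl (fun bits j =>
    let s : Int := (PySem.List.pyRange 0 8 1).foldl (fun s i =>
      if PySem.List.pyGetD (PySem.List.pyGetD pvMatrix j []) i 0 ≠ 0 then
        PySem.Int.bxor s (PySem.Int.band (x >>> i.toNat) 1)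
      else s) 0
    bits ++ [PySem.Int.toStr s]) []
  PySem.Str.join "" bits

-- ===== PORT B =====
def pvMasks : List Int := [68, 137, 39, 82, 181, 95, 202, 53]

-- for m in _MASKS: v = x & m; v ^= v >> 4; v ^= v >> 2; v ^= v >> 1; out.append(str(v & 1))
def toy_hash_bits_alt (x : Int) : String :=
  let out : List String := pvMasks.foldl (fun out m =>
    let v0 := PySem.Int.band x m
    let v1 := PySem.Int.bxor v0 (v0 >>> 4)
    let v2 := PySem.Int.bxor v1 (v1 >>> 2)
    let v3 := PySem.Int.bxor v2 (v2 >>> 1)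
    out ++ [PySem.Int.toStr (PySem.Int.band v3 1)]) []
  PySem.Str.join "" out

-- ===== PRECONDITION & SPEC =====
def Spec_toy_hash_bits (x : Int) (out : String) : Prop := out = toy_hash_bits_alt x
instance (x : Int) (out : String) : Decidable (Spec_toy_hash_bits x out) := by unfold Spec_toy_hash_bits; infer_instance

-- ===== CLAIM (what is proved, stated in full; the proofs are below) =====
def Claim_equal_toy_hash_bits : Prop := ∀ (x : Int), Dom_toy_hash_bits x → Spec_toy_hash_bits x (toy_hash_bits x)

-- ===== LEMMAS AND PROOFS =====

-- a &&& m only reads the low 8 bits of a when m < 256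
theorem pv_nat_and_mod (a m : Nat) (hm : m < 256) : a % 256 &&& m = a &&& m := by
  apply Nat.eq_of_testBit_eq
  intro i
  simp only [Nat.testBit_land, show (256:Nat) = 2 ^ 8 from rfl, Nat.testBit_mod_two_pow]
  by_cases hi : i < 8
  · simp [hi]
  · have h1 : m.testBit i = false :=
      Nat.testBit_eq_false_of_lt (lt_of_lt_of_le hm
        (Nat.pow_le_pow_right (by norm_num) (by omega) : (2:Nat)^8 ≤ 2^i))
    simp [h1]

-- band depends only on x mod 256 when the mask is below 256; the hca hypothesis
-- ((255 - r) is the 8-bit complement of r) is discharged by `decide` per concrete mask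
theorem pv_band_emod (x m : Int) (h0 : 0 ≤ m) (hm : m < 256)
    (hca : ∀ r : Nat, r < 256 → (255 - r) &&& m.toNat = m.toNat - (m.toNat &&& r)) :
    PySem.Int.band (x % 256) m = PySem.Int.band x m := by
  unfold PySem.Int.band
  have hx0 : 0 ≤ x % 256 := Int.emod_nonneg x (by norm_num)
  have hx1 : x % 256 < 256 := Int.emod_lt_of_pos x (by norm_num)
  by_cases hx : 0 ≤ x
  · rw [if_pos hx0, if_pos h0, if_pos hx, if_pos h0]
    have h2 : (x % 256).toNat = x.toNat % 256 := by omega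
    rw [h2, pv_nat_and_mod _ _ (by omega)]
  · rw [if_pos hx0, if_pos h0, if_neg hx, if_pos h0]
    have hMn : m.toNat &&& (-x - 1).toNat % 256 = m.toNat &&& (-x - 1).toNat := by
      rw [Nat.land_comm m.toNat, pv_nat_and_mod _ _ (by omega), Nat.land_comm]
    have hr : (x % 256).toNat = 255 - (-x - 1).toNat % 256 := by omega
    rw [hr, ← hMn, hca _ (by omega)]

-- (x >> i) & 1 depends only on x mod 256 when i < 8
theorem pv_bit_emod (x : Int) (i : Nat) (hi : i < 8) :
    PySem.Int.band ((x % 256) >>> i) 1 = PySem.Int.band (x >>> i) 1 := by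
  rw [PySem.Int.band_one, PySem.Int.band_one, Int.shiftRight_eq_div_pow, Int.shiftRight_eq_div_pow]
  unfold PySem.Int.mod
  rw [Int.fmod_eq_emod, Int.fmod_eq_emod]
  interval_cases i <;> norm_num <;> omega

theorem pv_A_emod (x : Int) : toy_hash_bits x = toy_hash_bits (x % 256) := by
  simp only [toy_hash_bits]
  apply congrArg (PySem.Str.join "")
  apply PySem.List.foldl_congr_mem
  intro bits j _
  apply congrArg (fun s => bits ++ [PySem.Int.toStr s])
  apply PySem.List.foldl_congr_mem
  intro s i hi
  rw [PySem.List.mem_pyRange_one] at hi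
  by_cases hc : PySem.List.pyGetD (PySem.List.pyGetD pvMatrix j []) i 0 ≠ 0
  · rw [if_pos hc, if_pos hc, pv_bit_emod x i.toNat (by omega)]
  · rw [if_neg hc, if_neg hc]

set_option maxRecDepth 8192 in
theorem pv_B_emod (x : Int) : toy_hash_bits_alt x = toy_hash_bits_alt (x % 256) := by
  have hca : ∀ m ∈ pvMasks, PySem.Int.band (x % 256) m = PySem.Int.band x m := by
    intro m hm
    simp only [pvMasks, List.mem_cons, List.not_mem_nil, or_false] at hm
    rcases hm with h | h | h | h | h | h | h | h <;> subst h <;>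
      exact pv_band_emod x _ (by norm_num) (by norm_num) (by decide)
  simp only [toy_hash_bits_alt]
  apply congrArg (PySem.Str.join "")
  apply PySem.List.foldl_congr_mem
  intro out m hm
  rw [hca m hm]

set_option maxRecDepth 8192 in
set_option maxHeartbeats 1000000 in
theorem pv_main256 : ∀ n : Nat, n < 256 → toy_hash_bits (n : Int) = toy_hash_bits_alt (n : Int) := by
  decide

-- ===== VERDICT (by name: the statement is the Claim_ definition above) =====
theorem toy_hash_bits_spec : Claim_equal_toy_hash_bits := by
  intro x _
  show toy_hash_bits x = toy_hash_bits_alt x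
  rw [pv_A_emod, pv_B_emod]
  have h0 : 0 ≤ x % 256 := Int.emod_nonneg x (by norm_num)
  have hc : x % 256 = ((x % 256).toNat : Int) := by omega
  rw [hc]
  exact pv_main256 _ (by omega)
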